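-- pv_equiv track=rewrite | github.com/Kenneth-Chin/Library-Titles | assignment.py | match_titles_and_merge
-- ===== SOURCE A (Python) =====
-- def info_string_matched(a, b):
--     """
--     A helper function for checking if two info strings of different books are equal or not
--     while considering if there's a wildcard character 'X' in one of the strings
--     """
--
--     # remove '-' from both strings
--     a = a.strip().replace('-', '')
--     b = b.strip().replace('-', '')
--
--     # convert lowercase x to uppercase X
--     a = a.replace('x', 'X')
--     b = b.replace('x', 'X')
--
--     # if both strings are equal, simply return True
--     if a == b:
--         return True
--
--     # if one of the strings contains 'X', check if substring before 'X' equal to the other string's substring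
--     # before index of X in first string, and check the same for substring after 'X'
--     # if both are true, then info string is matched and return True, otherwise return False
--     elif "X" in a:
--         i = a.index("X")
--         if a[:i] + a[i+1:] == b[:i] + b[i+1:]:
--             return True
--         else:
--             return False
--     elif "X" in b:
--         i = b.index("X")
--         if a[:i] + a[i+1:] == b[:i] + b[i+1:]:
--             return True
--         else:
--             return False
--     else:
--         return False
--
-- def match_titles_and_merge(input_dict):
--     """
--     Match books that are of same titles into lists
--     where they are categorized by their title name in a dictionary
--     while merging same books from same DB into one item
--     """
--     title_matching_dict = dict()
--
--     # go through each book and categorize them one by one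
--     for book in input_dict:
--         # clean the book's title string and convert it into uppercase
--         title = book["TITLE"].strip().upper()
--
--         # if title has not been seen and added to the dictionary yet, then create the key and append an empty list to it
--         if title not in title_matching_dict:
--             title_matching_dict[title] = []
--
--         # check in the existing list of the corresponding title if same book item from same database already exist
--         is_distinct = True
--         for book2 in title_matching_dict[title]:
--             # if there is a book that is from same DB, and each info string is matched, then it is not distinct
--             if book["DB"] == book2["DB"]:
--                 if info_string_matched(book["ISSN"], book2["ISSN"]) \
--                  and info_string_matched(book["e-ISSN"], book2["e-ISSN"]) \
--                  and info_string_matched(book["ISBN"], book2["ISBN"]) \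
--                  and info_string_matched(book["e-ISBN"], book2["e-ISBN"]):
--                     is_distinct = False
--
--         # if the book is distinct, then append the item to the list in the dictionary
--         if is_distinct:
--             title_matching_dict[title].append(book)
--
--     return title_matching_dict
-- ===== SOURCE B (Python) =====
-- def _info_matched(a, b):
--     a = a.strip().replace('-', '').replace('x', 'X')
--     b = b.strip().replace('-', '').replace('x', 'X')
--     if a == b:
--         return True
--     if 'X' in a:
--         i = a.index('X')
--     elif 'X' in b:
--         i = b.index('X')
--     else:
--         return False
--     return a[:i] + a[i+1:] == b[:i] + b[i+1:]
--
-- def _infos_matched(a, b):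
--     return all(_info_matched(a[k], b[k]) for k in ("ISSN", "e-ISSN", "ISBN", "e-ISBN"))
--
-- def _dedup_group(books):
--     # Matching requires identical DB, so the title group splits into independent
--     # per-DB buckets; dedup each bucket on its own (comparing only the four info
--     # strings), collect the surviving original indices, and rebuild the group in
--     # its original interleaved order from that index set.
--     buckets = {}
--     for i, book in enumerate(books):
--         buckets.setdefault(book.get("DB"), []).append((i, book))
--     kept = set()
--     for bucket in buckets.values():
--         accepted = []
--         for i, book in bucket:
--             if not any(_infos_matched(book, prev) for _, prev in accepted):
--                 accepted.append((i, book))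
--                 kept.add(i)
--     return [book for i, book in enumerate(books) if i in kept]
--
-- def match_titles_and_merge(input_dict):
--     groups = {}
--     for book in input_dict:
--         groups.setdefault(book["TITLE"].strip().upper(), []).append(book)
--     return {title: _dedup_group(books) for title, books in groups.items()}
-- ===== Notes on version B (the rewrite author's own statement) =====
-- stated objective: alternative
-- what changed: B exploits that two books can only merge when their DB strings are identical: it splits each title group into independent per-DB buckets (indexed by original position), dedups each bucket on its own comparing only the four info strings, and rebuilds the group in original order from the kept index set, instead of A's single interleaved scan that flag-tests every new book against the whole kept list with an explicit DB comparison inside the inner loop.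
import Mathlib
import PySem

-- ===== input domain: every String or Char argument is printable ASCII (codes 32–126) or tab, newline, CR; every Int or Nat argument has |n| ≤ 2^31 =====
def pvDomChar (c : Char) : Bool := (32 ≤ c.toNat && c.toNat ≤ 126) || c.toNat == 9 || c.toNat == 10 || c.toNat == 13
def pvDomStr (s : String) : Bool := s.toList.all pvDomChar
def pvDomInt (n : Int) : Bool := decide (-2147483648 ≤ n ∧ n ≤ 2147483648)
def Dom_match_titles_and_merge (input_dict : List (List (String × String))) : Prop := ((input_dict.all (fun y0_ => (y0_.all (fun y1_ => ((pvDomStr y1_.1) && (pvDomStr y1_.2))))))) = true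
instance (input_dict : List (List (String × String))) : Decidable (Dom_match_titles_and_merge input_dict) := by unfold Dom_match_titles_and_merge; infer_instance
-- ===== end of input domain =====

-- B splits each title group into independent per-DB buckets, dedups each bucket separately and
-- rebuilds the group from the kept index set; equal return value, no mutation involved.

-- ===== PORT A =====
-- book[k] on a dict; KeyError (missing key) is excluded by Pre_, so the default "" is never read there
def pyGetItemA (book : List (String × String)) (k : String) : String :=
  (PySem.Dict.mk book).getD k ""

def infoStringMatched (a0 b0 : String) : Bool :=
  let a1 := PySem.Chars.replace (PySem.Chars.strip a0.toList) ['-'] []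
  let b1 := PySem.Chars.replace (PySem.Chars.strip b0.toList) ['-'] []
  let a := PySem.Chars.replace a1 ['x'] ['X']
  let b := PySem.Chars.replace b1 ['x'] ['X']
  if a == b then true
  else if PySem.Chars.isIn ['X'] a then
    -- a.index("X") is guarded by '"X" in a', so it equals find
    let i := PySem.Chars.find a ['X']
    if PySem.Chars.slice a none (some i) ++ PySem.Chars.slice a (some (i+1)) none
        == PySem.Chars.slice b none (some i) ++ PySem.Chars.slice b (some (i+1)) none
    then true else false
  else if PySem.Chars.isIn ['X'] b then
    let i := PySem.Chars.find b ['X']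
    if PySem.Chars.slice a none (some i) ++ PySem.Chars.slice a (some (i+1)) none
        == PySem.Chars.slice b none (some i) ++ PySem.Chars.slice b (some (i+1)) none
    then true else false
  else false

def stepA (d : PySem.Dict String (List (List (String × String)))) (book : List (String × String)) :
    PySem.Dict String (List (List (String × String))) :=
  let title := PySem.Str.upper (PySem.Str.strip (pyGetItemA book "TITLE"))
  let d := if d.contains title then d else d.insert title []
  let isDistinct := (d.getD title []).foldl (fun isDistinct book2 =>
    if pyGetItemA book "DB" == pyGetItemA book2 "DB" then
      if infoStringMatched (pyGetItemA book "ISSN") (pyGetItemA book2 "ISSN")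
          && infoStringMatched (pyGetItemA book "e-ISSN") (pyGetItemA book2 "e-ISSN")
          && infoStringMatched (pyGetItemA book "ISBN") (pyGetItemA book2 "ISBN")
          && infoStringMatched (pyGetItemA book "e-ISBN") (pyGetItemA book2 "e-ISBN")
      then false else isDistinct
    else isDistinct) true
  if isDistinct then d.insert title (d.getD title [] ++ [book]) else d

def match_titles_and_merge (input_dict : List (List (String × String))) :
    List (String × List (List (String × String))) :=
  (input_dict.foldl stepA PySem.Dict.empty).items

-- ===== PORT B =====
def fieldB (book : List (String × String)) (k : String) : String :=
  (((book.find? (fun p => p.1 == k)).map (·.2)).getD "")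

def infoMatchB (a0 b0 : String) : Bool :=
  let a := PySem.Chars.replace (PySem.Chars.replace (PySem.Chars.strip a0.toList) ['-'] []) ['x'] ['X']
  let b := PySem.Chars.replace (PySem.Chars.replace (PySem.Chars.strip b0.toList) ['-'] []) ['x'] ['X']
  if a == b then true
  else
    let i? : Option Int :=
      if PySem.Chars.isIn ['X'] a then some (PySem.Chars.find a ['X'])
      else if PySem.Chars.isIn ['X'] b then some (PySem.Chars.find b ['X'])
      else none
    match i? with
    | none => false
    | some i =>
        PySem.Chars.slice a none (some i) ++ PySem.Chars.slice a (some (i+1)) none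
          == PySem.Chars.slice b none (some i) ++ PySem.Chars.slice b (some (i+1)) none

def infosB (a b : List (String × String)) : Bool :=
  ["ISSN", "e-ISSN", "ISBN", "e-ISBN"].all (fun k => infoMatchB (fieldB a k) (fieldB b k))

-- book.get(k): None when the key is absent
def getOptB (book : List (String × String)) (k : String) : Option String :=
  (book.find? (fun p => p.1 == k)).map (·.2)

def bucketsB (books : List (List (String × String))) :
    PySem.Dict (Option String) (List (Int × List (String × String))) :=
  (PySem.List.enumerate books).foldl
    (fun d p => d.modify (getOptB p.2 "DB") [] (· ++ [p])) PySem.Dict.empty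

def keptSetB (books : List (List (String × String))) : PySem.Set Int :=
  (bucketsB books).values.foldl (fun s bucket =>
    (bucket.foldl
      (fun (st : List (Int × List (String × String)) × PySem.Set Int) q =>
        if st.1.any (fun r => infosB q.2 r.2) then st
        else (st.1 ++ [q], PySem.Set.add st.2 q.1))
      (([] : List (Int × List (String × String))), s)).2) PySem.Set.empty

def dedupGroupB (books : List (List (String × String))) : List (List (String × String)) :=
  ((PySem.List.enumerate books).filter
    (fun p => PySem.Set.contains (keptSetB books) p.1)).map (·.2)

def groupStepB (d : PySem.Dict String (List (List (String × String)))) (book : List (String × String)) :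
    PySem.Dict String (List (List (String × String))) :=
  d.modify (PySem.Str.upper (PySem.Str.strip (fieldB book "TITLE"))) [] (· ++ [book])

def match_titles_and_merge_alt (input_dict : List (List (String × String))) :
    List (String × List (List (String × String))) :=
  let groups := input_dict.foldl groupStepB PySem.Dict.empty
  (groups.items.foldl (fun r p => r.insert p.1 (dedupGroupB p.2)) PySem.Dict.empty).items

-- ===== PRECONDITION & SPEC =====
-- lookup helpers for Pre_ only (Pre_ may not reference the ports)
def preHas (book : List (String × String)) (k : String) : Bool :=
  book.any (fun p => p.1 == k)
def preField (book : List (String × String)) (k : String) : String :=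
  ((book.find? (fun p => p.1 == k)).map (·.2)).getD ""
def preTitle (book : List (String × String)) : String :=
  PySem.Str.upper (PySem.Str.strip (preField book "TITLE"))

-- Pre_ excludes the inputs on which Python A raises KeyError: a book without "TITLE", two
-- same-title books without "DB", or a same-title same-DB pair without the four info fields
-- (slightly wider than A's exact raising set, since 'and' short-circuiting can skip a missing
-- later info field and still return).
def Pre_match_titles_and_merge (input_dict : List (List (String × String))) : Prop :=
  (∀ book ∈ input_dict, preHas book "TITLE" = true) ∧
  input_dict.Pairwise (fun b1 b2 => preTitle b1 = preTitle b2 →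
    preHas b1 "DB" = true ∧ preHas b2 "DB" = true ∧
    (preField b1 "DB" = preField b2 "DB" →
      ∀ k ∈ ["ISSN", "e-ISSN", "ISBN", "e-ISBN"], preHas b1 k = true ∧ preHas b2 k = true))
instance (input_dict : List (List (String × String))) : Decidable (Pre_match_titles_and_merge input_dict) := by unfold Pre_match_titles_and_merge; infer_instance

def pvWitness_match_titles_and_merge : (List (List (String × String))) :=
  [[("TITLE", " a "), ("DB", "db1"), ("ISSN", "12-3"), ("e-ISSN", "4x5"), ("ISBN", ""), ("e-ISBN", "X")],
   [("TITLE", "A"), ("DB", "db1"), ("ISSN", "123"), ("e-ISSN", "4X5"), ("ISBN", ""), ("e-ISBN", "9")]]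

def Spec_match_titles_and_merge (input_dict : List (List (String × String))) (out : List (String × List (List (String × String)))) : Prop := out = match_titles_and_merge_alt input_dict
instance (input_dict : List (List (String × String))) (out : List (String × List (List (String × String)))) : Decidable (Spec_match_titles_and_merge input_dict out) := by unfold Spec_match_titles_and_merge; infer_instance

-- ===== CLAIM (what is proved, stated in full; the proofs are below) =====
def Claim_equal_match_titles_and_merge : Prop := ∀ (input_dict : List (List (String × String))), Dom_match_titles_and_merge input_dict → Pre_match_titles_and_merge input_dict → Spec_match_titles_and_merge input_dict (match_titles_and_merge input_dict)

-- ===== LEMMAS AND PROOFS =====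

-- proof-side abbreviations
def sameBk (new old : List (String × String)) : Bool :=
  (fieldB new "DB" == fieldB old "DB") && infosB new old

-- the sequential "compare against the kept list" dedup both programs compute
def keptSeq (l : List (List (String × String))) : List (List (String × String)) :=
  l.foldl (fun kept b => if kept.any (fun prev => sameBk b prev) then kept else kept ++ [b]) []

def keptSeqP (e : List (Int × List (String × String))) : List (Int × List (String × String)) :=
  e.foldl (fun kept p => if kept.any (fun q => sameBk p.2 q.2) then kept else kept ++ [p]) []

def dedupBkt (bucket : List (Int × List (String × String))) : List (Int × List (String × String)) :=
  bucket.foldl (fun acc q => if acc.any (fun r => infosB q.2 r.2) then acc else acc ++ [q]) []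

lemma field_eq (book : List (String × String)) (k : String) : fieldB book k = pyGetItemA book k := rfl

lemma info_eq (a b : String) : infoMatchB a b = infoStringMatched a b := by
  simp only [infoMatchB, infoStringMatched]
  split_ifs <;> simp_all

lemma sameBk_cond (new old : List (String × String)) :
    sameBk new old =
      (pyGetItemA new "DB" == pyGetItemA old "DB"
        && (infoStringMatched (pyGetItemA new "ISSN") (pyGetItemA old "ISSN")
          && infoStringMatched (pyGetItemA new "e-ISSN") (pyGetItemA old "e-ISSN")
          && infoStringMatched (pyGetItemA new "ISBN") (pyGetItemA old "ISBN")
          && infoStringMatched (pyGetItemA new "e-ISBN") (pyGetItemA old "e-ISBN"))) := by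
  simp [sameBk, infosB, field_eq, info_eq, Bool.and_assoc]

-- A's is_distinct flag loop computes "acc && no element matches"
lemma flag_eq (book : List (String × String)) :
    ∀ (l : List (List (String × String))) (acc : Bool),
      l.foldl (fun isDistinct book2 =>
        if pyGetItemA book "DB" == pyGetItemA book2 "DB" then
          if infoStringMatched (pyGetItemA book "ISSN") (pyGetItemA book2 "ISSN")
              && infoStringMatched (pyGetItemA book "e-ISSN") (pyGetItemA book2 "e-ISSN")
              && infoStringMatched (pyGetItemA book "ISBN") (pyGetItemA book2 "ISBN")
              && infoStringMatched (pyGetItemA book "e-ISBN") (pyGetItemA book2 "e-ISBN")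
          then false else isDistinct
        else isDistinct) acc = (acc && !(l.any (fun prev => sameBk book prev))) := by
  intro l
  induction l with
  | nil => simp
  | cons x xs ih =>
    intro acc
    simp only [List.foldl_cons, List.any_cons, ih, sameBk_cond]
    by_cases h1 : (pyGetItemA book "DB" == pyGetItemA x "DB") = true <;>
      simp [h1, Bool.and_assoc, Bool.and_left_comm, Bool.and_comm]

-- ---- B's bucketed dedup equals the sequential dedup ----

lemma keptSeq_append (l : List (List (String × String))) (b : List (String × String)) :
    keptSeq (l ++ [b]) =
      if (keptSeq l).any (fun prev => sameBk b prev) then keptSeq l else keptSeq l ++ [b] := by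
  simp [keptSeq, List.foldl_append]

lemma keptSeqP_append (e : List (Int × List (String × String))) (p : Int × List (String × String)) :
    keptSeqP (e ++ [p]) =
      if (keptSeqP e).any (fun q => sameBk p.2 q.2) then keptSeqP e else keptSeqP e ++ [p] := by
  simp [keptSeqP, List.foldl_append]

lemma dedupBkt_append (e : List (Int × List (String × String))) (p : Int × List (String × String)) :
    dedupBkt (e ++ [p]) =
      if (dedupBkt e).any (fun r => infosB p.2 r.2) then dedupBkt e else dedupBkt e ++ [p] := by
  simp [dedupBkt, List.foldl_append]

lemma keptSeqP_sublist (e : List (Int × List (String × String))) : (keptSeqP e).Sublist e := by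
  induction e using List.reverseRecOn with
  | nil => simp [keptSeqP]
  | append_singleton e p ih =>
    rw [keptSeqP_append]
    split_ifs
    · exact ih.trans (List.sublist_append_left e [p])
    · exact List.Sublist.append ih (List.Sublist.refl [p])

lemma fieldB_getOpt (b : List (String × String)) (k : String) :
    fieldB b k = (getOptB b k).getD "" := rfl

-- a generic "setdefault(key(x), []).append(x)" loop groups by key
lemma getD_foldl_modify_append_key {κ : Type} [BEq κ] [LawfulBEq κ] [DecidableEq κ] {β : Type}
    (key : β → κ) (c : κ) :
    ∀ (e : List β) (d : PySem.Dict κ (List β)),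
      (e.foldl (fun d p => d.modify (key p) [] (· ++ [p])) d).getD c [] =
        d.getD c [] ++ e.filter (fun p => key p == c) := by
  intro e
  induction e with
  | nil => simp
  | cons p e ih =>
    intro d
    simp only [List.foldl_cons, List.filter_cons, ih]
    by_cases h : key p = c
    · simp [h]
    · simp [PySem.Dict.getD_modify, Ne.symm h, h]

-- the per-DB bucket invariant: on a run whose books all carry "DB", dedup of the
-- DB-c bucket is the DB-c slice of the sequential dedup
lemma bucket_inv (e : List (Int × List (String × String))) (c : Option String)
    (hs : ∀ p ∈ e, (getOptB p.2 "DB").isSome = true) :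
    dedupBkt (e.filter (fun p => getOptB p.2 "DB" == c)) =
      (keptSeqP e).filter (fun p => getOptB p.2 "DB" == c) := by
  induction e using List.reverseRecOn with
  | nil => simp [dedupBkt, keptSeqP]
  | append_singleton e p ih =>
    have hse : ∀ q ∈ e, (getOptB q.2 "DB").isSome = true :=
      fun q hq => hs q (List.mem_append_left _ hq)
    have hsp : (getOptB p.2 "DB").isSome = true := hs p (List.mem_append_right _ List.mem_cons_self)
    rw [List.filter_append, keptSeqP_append]
    by_cases h : (getOptB p.2 "DB" == c) = true
    · have hc : getOptB p.2 "DB" = c := by simpa using h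
      obtain ⟨v, hv⟩ := Option.isSome_iff_exists.mp hsp
      have hpt : ∀ q ∈ keptSeqP e, sameBk p.2 q.2
          = ((getOptB q.2 "DB" == c) && infosB p.2 q.2) := by
        intro q hq
        obtain ⟨w, hw⟩ := Option.isSome_iff_exists.mp (hse q ((keptSeqP_sublist e).subset hq))
        rw [sameBk, fieldB_getOpt, fieldB_getOpt, hv, hw, ← hc, hv]
        simp only [Option.getD_some]
        rw [BEq.comm]
        simp
      have hcond : ((keptSeqP e).any fun q => sameBk p.2 q.2)
          = (((keptSeqP e).filter (fun q => getOptB q.2 "DB" == c)).any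
              fun q => infosB p.2 q.2) := by
        rw [List.any_filter, Bool.eq_iff_iff]
        simp only [List.any_eq_true]
        exact ⟨fun ⟨q, hq, hsb⟩ => ⟨q, hq, by rwa [hpt q hq] at hsb⟩,
               fun ⟨q, hq, hsb⟩ => ⟨q, hq, by rwa [hpt q hq]⟩⟩
      rw [List.filter_singleton]
      simp only [h, cond_true]
      rw [dedupBkt_append, ih hse, ← hcond]
      by_cases ha : ((keptSeqP e).any fun q => sameBk p.2 q.2) = true
      · simp [ha]
      · simp [ha, List.filter_append, h]
    · simp only [List.filter_singleton, h]
      split_ifs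
      · simpa using ih hse
      · simp only [List.filter_append, List.filter_singleton, h]
        simpa using ih hse

-- the grouping fold's value at key c is the DB-c slice
lemma buckets_getD (l : List (List (String × String))) (c : Option String) :
    (bucketsB l).getD c [] =
      (PySem.List.enumerate l).filter (fun p => getOptB p.2 "DB" == c) := by
  have h := getD_foldl_modify_append_key (fun p => getOptB p.2 "DB") c
    (PySem.List.enumerate l) PySem.Dict.empty
  rw [bucketsB]
  simpa using h

lemma buckets_keys (l : List (List (String × String))) :
    (bucketsB l).keys =
      PySem.Set.ofList ((PySem.List.enumerate l).map (fun p => getOptB p.2 "DB")) := by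
  rw [bucketsB,
    PySem.Dict.keys_foldl_modify_key (PySem.List.enumerate l) (fun p => getOptB p.2 "DB") []
      (fun _ p => (· ++ [p])) PySem.Dict.empty]
  rfl

lemma buckets_nodup_keys (l : List (List (String × String))) : (bucketsB l).keys.Nodup :=
  PySem.Dict.nodup_keys_foldl_modify_key (PySem.List.enumerate l) (fun p => getOptB p.2 "DB") []
    (fun _ p => (· ++ [p])) PySem.Dict.empty (by simp)

lemma dedupBkt_prefix :
    ∀ (bucket acc : List (Int × List (String × String))),
      ∃ t, bucket.foldl
          (fun acc q => if acc.any (fun r => infosB q.2 r.2) then acc else acc ++ [q]) acc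
        = acc ++ t := by
  intro bucket
  induction bucket with
  | nil => exact fun acc => ⟨[], by simp⟩
  | cons q bucket ih =>
    intro acc
    simp only [List.foldl_cons]
    by_cases h : (acc.any fun r => infosB q.2 r.2) = true
    · simpa [h] using ih acc
    · obtain ⟨t, ht⟩ := ih (acc ++ [q])
      exact ⟨q :: t, by simp [h, ht]⟩

-- the inner (accepted, kept) fold: second component collects the indices of the bucket's dedup
lemma inner_fold (bucket : List (Int × List (String × String))) (s : PySem.Set Int) :
    (bucket.foldl
      (fun (st : List (Int × List (String × String)) × PySem.Set Int) q =>
        if st.1.any (fun r => infosB q.2 r.2) then st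
        else (st.1 ++ [q], PySem.Set.add st.2 q.1))
      (([] : List (Int × List (String × String))), s)).2 =
      PySem.Set.update s ((dedupBkt bucket).map (·.1)) := by
  suffices hgen : ∀ (bucket acc : List (Int × List (String × String))) (s : PySem.Set Int),
      bucket.foldl
        (fun (st : List (Int × List (String × String)) × PySem.Set Int) q =>
          if st.1.any (fun r => infosB q.2 r.2) then st
          else (st.1 ++ [q], PySem.Set.add st.2 q.1)) (acc, s)
      = (bucket.foldl
          (fun acc q => if acc.any (fun r => infosB q.2 r.2) then acc else acc ++ [q]) acc,
         PySem.Set.update s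
          (((bucket.foldl
            (fun acc q => if acc.any (fun r => infosB q.2 r.2) then acc else acc ++ [q]) acc).drop
              acc.length).map (·.1))) by
    rw [hgen bucket [] s]; rfl
  intro bucket
  induction bucket with
  | nil => intro acc s; simp [PySem.Set.update]
  | cons q bucket ih =>
    intro acc s
    simp only [List.foldl_cons]
    by_cases h : (acc.any fun r => infosB q.2 r.2) = true
    · simp only [h, if_pos]
      exact ih acc s
    · simp only [h, if_neg, Bool.false_eq_true, not_false_iff]
      rw [ih (acc ++ [q]) (PySem.Set.add s q.1)]
      obtain ⟨t, ht⟩ := dedupBkt_prefix bucket (acc ++ [q])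
      rw [ht]
      have h1 : ((acc ++ [q]) ++ t).drop acc.length = q :: t := by
        rw [List.append_assoc, List.drop_left]
        rfl
      have h2 : ((acc ++ [q]) ++ t).drop (acc ++ [q]).length = t := List.drop_left
      rw [h1, h2]
      rfl

lemma foldl_update_mem {κ : Type} (F : κ → List Int) :
    ∀ (ks : List κ) (s : PySem.Set Int) (i : Int),
      i ∈ ks.foldl (fun s k => PySem.Set.update s (F k)) s ↔ i ∈ s ∨ ∃ k ∈ ks, i ∈ F k := by
  intro ks
  induction ks with
  | nil => simp
  | cons k ks ih =>
    intro s i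
    simp [List.foldl_cons, ih, PySem.Set.mem_update, or_assoc]

-- membership in the kept index set
lemma mem_keptSetB (l : List (List (String × String))) (i : Int)
    (hs : ∀ p ∈ PySem.List.enumerate l, (getOptB p.2 "DB").isSome = true) :
    i ∈ keptSetB l ↔ ∃ q ∈ keptSeqP (PySem.List.enumerate l), q.1 = i := by
  rw [keptSetB, PySem.Dict.values_eq_map_keys _ (buckets_nodup_keys l) [], List.foldl_map]
  simp only [inner_fold, buckets_getD]
  have hbi : ∀ c, dedupBkt ((PySem.List.enumerate l).filter (fun p => getOptB p.2 "DB" == c))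
      = (keptSeqP (PySem.List.enumerate l)).filter (fun p => getOptB p.2 "DB" == c) :=
    fun c => bucket_inv _ c hs
  simp only [hbi]
  rw [foldl_update_mem (fun k =>
    (((keptSeqP (PySem.List.enumerate l)).filter (fun p => getOptB p.2 "DB" == k)).map (·.1)))]
  simp only [PySem.Set.empty, List.not_mem_nil, false_or, buckets_keys, PySem.Set.mem_ofList,
    List.mem_map, List.mem_filter]
  constructor
  · rintro ⟨k, _, q, ⟨hq, _⟩, hi⟩
    exact ⟨q, hq, hi⟩
  · rintro ⟨q, hq, hi⟩
    have hqe : q ∈ PySem.List.enumerate l := (keptSeqP_sublist _).subset hq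
    exact ⟨getOptB q.2 "DB", ⟨q, hqe, rfl⟩, q, ⟨hq, by simp⟩, hi⟩

lemma enum_fst_inj : ∀ {e : List (Int × List (String × String))},
    e.Pairwise (fun a b => a.1 < b.1) →
    ∀ p ∈ e, ∀ q ∈ e, p.1 = q.1 → p = q := by
  intro e
  induction e with
  | nil => simp
  | cons a e ih =>
    intro hp p hpm q hqm heq
    rcases List.pairwise_cons.mp hp with ⟨ha, hp'⟩
    rcases List.mem_cons.mp hpm with hp1 | hp2 <;> rcases List.mem_cons.mp hqm with hq1 | hq2
    · rw [hp1, hq1]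
    · exact absurd heq (by have := ha q hq2; rw [hp1]; omega)
    · exact absurd heq (by have := ha p hp2; rw [hq1]; omega)
    · exact ih hp' p hp2 q hq2 heq

lemma filter_mem_sublist {α : Type} (f : α → Bool) :
    ∀ {s e : List α}, s.Sublist e → e.Nodup → (∀ x ∈ e, (f x = true ↔ x ∈ s)) →
      e.filter f = s := by
  intro s e h
  induction h with
  | slnil => intro _ _; simp
  | @cons l₁ l₂ a h ih =>
    intro hnd hf
    rcases List.nodup_cons.mp hnd with ⟨hna, hnd'⟩
    have hfa : f a = false := by
      rw [Bool.eq_false_iff]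
      intro hfa
      exact hna (h.subset ((hf a (List.mem_cons_self)).mp hfa))
    rw [List.filter_cons, hfa]
    exact ih hnd' (fun x hx => hf x (List.mem_cons_of_mem a hx))
  | @cons₂ l₁ l₂ a h ih =>
    intro hnd hf
    rcases List.nodup_cons.mp hnd with ⟨hna, hnd'⟩
    have hfa : f a = true := (hf a List.mem_cons_self).mpr List.mem_cons_self
    rw [List.filter_cons, hfa]
    simp only [if_true]
    congr 1
    apply ih hnd'
    intro x hx
    rw [hf x (List.mem_cons_of_mem a hx)]
    have hxa : x ≠ a := fun hxa => hna (hxa ▸ hx)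
    simp [List.mem_cons, hxa]

lemma keptSeqP_map_snd (l : List (List (String × String))) :
    (keptSeqP (PySem.List.enumerate l)).map (·.2) = keptSeq l := by
  suffices hgen : ∀ (l : List (List (String × String))) (s : Int),
      (keptSeqP (PySem.List.enumerate l s)).map (·.2) = keptSeq l by
    exact hgen l 0
  intro l
  induction l using List.reverseRecOn with
  | nil => intro s; simp [keptSeqP, keptSeq, PySem.List.enumerate_nil]
  | append_singleton l b ih =>
    intro s
    rw [PySem.List.enumerate_append, PySem.List.enumerate_cons, PySem.List.enumerate_nil,
      keptSeqP_append, keptSeq_append]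
    have hany : ((keptSeqP (PySem.List.enumerate l s)).any
        fun q => sameBk ((s + ↑l.length, b) : Int × List (String × String)).2 q.2)
        = ((keptSeq l).any fun prev => sameBk b prev) := by
      rw [← ih s, List.any_map]
      rfl
    rw [hany]
    split_ifs
    · exact ih s
    · rw [List.map_append, ih s]
      rfl

-- groups of at most one book dedup to themselves
lemma dedupGroupB_small (l : List (List (String × String))) (hl : l.length ≤ 1) :
    dedupGroupB l = keptSeq l := by
  match l with
  | [] => rfl
  | [b] => rfl
  | a :: b :: t => simp at hl

lemma dedupGroupB_eq (l : List (List (String × String)))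
    (hs : ∀ b ∈ l, (getOptB b "DB").isSome = true) : dedupGroupB l = keptSeq l := by
  rw [dedupGroupB]
  have hpw := PySem.List.pairwise_lt_enumerate l 0
  have hnd : (PySem.List.enumerate l).Nodup :=
    hpw.imp (fun h heq => by rw [heq] at h; exact lt_irrefl _ h)
  have hse : ∀ p ∈ PySem.List.enumerate l, (getOptB p.2 "DB").isSome = true := by
    intro p hp
    have : p.2 ∈ (PySem.List.enumerate l).map (·.2) := List.mem_map_of_mem hp
    rw [PySem.List.map_snd_enumerate] at this
    exact hs p.2 this
  have hfc : ∀ p ∈ PySem.List.enumerate l,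
      (PySem.Set.contains (keptSetB l) p.1 = true ↔
        p ∈ keptSeqP (PySem.List.enumerate l)) := by
    intro p hp
    rw [PySem.Set.contains_iff, mem_keptSetB l p.1 hse]
    constructor
    · rintro ⟨q, hq, hqi⟩
      exact enum_fst_inj hpw q ((keptSeqP_sublist _).subset hq) p hp hqi ▸ hq
    · exact fun h => ⟨p, h, rfl⟩
  rw [filter_mem_sublist _ (keptSeqP_sublist _) hnd hfc, keptSeqP_map_snd]

-- ---- the grouping machinery (A's interleaved dict loop vs B's grouping pass) ----

def mapD (g : PySem.Dict String (List (List (String × String)))) :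
    PySem.Dict String (List (List (String × String))) :=
  PySem.Dict.mk (g.items.map (fun p => (p.1, keptSeq p.2)))

lemma get?_mapD (g : PySem.Dict String (List (List (String × String)))) (t : String) :
    (mapD g).get? t = (g.get? t).map keptSeq := by
  simp [mapD, PySem.Dict.get?, List.find?_map, Function.comp_def, Option.map_map]

lemma contains_mapD (g : PySem.Dict String (List (List (String × String)))) (t : String) :
    (mapD g).contains t = g.contains t := by
  simp [mapD, PySem.Dict.contains, List.any_map, Function.comp_def]

lemma keys_mapD (g : PySem.Dict String (List (List (String × String)))) :
    (mapD g).keys = g.keys := by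
  simp [mapD, PySem.Dict.keys, List.map_map, Function.comp_def]

lemma getD_mapD (g : PySem.Dict String (List (List (String × String)))) (t : String) :
    (mapD g).getD t [] = keptSeq (g.getD t []) := by
  simp only [PySem.Dict.getD, get?_mapD]
  cases g.get? t with
  | none => simp [keptSeq]
  | some v => simp

lemma mapD_insert (g : PySem.Dict String (List (List (String × String)))) (t : String)
    (v : List (List (String × String))) :
    mapD (g.insert t v) = (mapD g).insert t (keptSeq v) := by
  apply PySem.Dict.ext
  simp only [PySem.Dict.insert, contains_mapD]
  by_cases hc : g.contains t = true
  · simp only [hc, if_pos]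
    simp only [mapD, List.map_map]
    apply List.map_congr_left
    intro p _
    by_cases hp : p.1 = t <;> simp [hp]
  · simp only [hc, if_neg, Bool.false_eq_true, not_false_iff]
    simp [mapD]

lemma insert_self_of_nodup (d : PySem.Dict String (List (List (String × String)))) (t : String)
    (hnd : d.keys.Nodup) (hc : d.contains t = true) :
    d.insert t (d.getD t []) = d := by
  apply PySem.Dict.ext
  simp only [PySem.Dict.insert, hc, if_pos]
  conv_rhs => rw [← List.map_id d.items]
  apply List.map_congr_left
  intro p hp
  by_cases hk : (p.1 == t) = true
  · have ht : p.1 = t := by simpa using hk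
    have hm : (p.1, p.2) ∈ d.items := by simpa using hp
    have hv : d.getD p.1 [] = p.2 := PySem.Dict.getD_of_mem_items d hm hnd []
    simp [← ht, hv]
  · simp [hk]

lemma step_comm (g : PySem.Dict String (List (List (String × String))))
    (b : List (String × String)) (hnd : g.keys.Nodup) :
    stepA (mapD g) b = mapD (groupStepB g b) := by
  have htk : PySem.Str.upper (PySem.Str.strip (fieldB b "TITLE"))
      = PySem.Str.upper (PySem.Str.strip (pyGetItemA b "TITLE")) := rfl
  set t := PySem.Str.upper (PySem.Str.strip (pyGetItemA b "TITLE")) with ht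
  have hB : groupStepB g b = g.insert t (g.getD t [] ++ [b]) := by
    simp [groupStepB, PySem.Dict.modify, htk]
  by_cases hc : g.contains t = true
  · have hcm : (mapD g).contains t = true := by rw [contains_mapD]; exact hc
    have hA : stepA (mapD g) b =
        if ((keptSeq (g.getD t [])).any fun prev => sameBk b prev) then mapD g
        else (mapD g).insert t (keptSeq (g.getD t []) ++ [b]) := by
      simp only [stepA, ← ht, hcm, if_pos, flag_eq, Bool.true_and, getD_mapD]
      by_cases ha : ((keptSeq (g.getD t [])).any fun prev => sameBk b prev) = true <;>
        simp [ha]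
    rw [hA, hB, mapD_insert, keptSeq_append]
    by_cases ha : ((keptSeq (g.getD t [])).any fun prev => sameBk b prev) = true
    · rw [if_pos ha, if_pos ha, ← getD_mapD]
      exact (insert_self_of_nodup (mapD g) t (by rw [keys_mapD]; exact hnd) hcm).symm
    · rw [if_neg (by simp [ha]), if_neg (by simp [ha])]
  · have hcf : (mapD g).contains t = false := by
      rw [contains_mapD]; simpa using hc
    have hg0 : g.getD t [] = [] :=
      PySem.Dict.getD_of_not_contains g [] (by simpa using hc)
    have hA : stepA (mapD g) b = (mapD g).insert t [b] := by
      simp [stepA, ← ht, hcf, PySem.Dict.getD_insert_self, PySem.Dict.insert_insert_self]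
    rw [hA, hB, mapD_insert, hg0]
    rw [keptSeq_append]
    simp [keptSeq]

lemma nodup_groupStepB (g : PySem.Dict String (List (List (String × String))))
    (b : List (String × String)) (hnd : g.keys.Nodup) :
    (groupStepB g b).keys.Nodup := by
  simpa [groupStepB, PySem.Dict.modify] using PySem.Dict.nodup_keys_insert _ _ _ hnd

lemma main_inv : ∀ (xs : List (List (String × String)))
    (g : PySem.Dict String (List (List (String × String)))), g.keys.Nodup →
    xs.foldl stepA (mapD g) = mapD (xs.foldl groupStepB g) := by
  intro xs
  induction xs with
  | nil => intro g _; rfl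
  | cons b xs ih =>
    intro g hnd
    simp only [List.foldl_cons, step_comm g b hnd]
    exact ih _ (nodup_groupStepB g b hnd)

lemma mapD_empty : mapD PySem.Dict.empty = PySem.Dict.empty := rfl

lemma groups_getD (input_dict : List (List (String × String))) (t : String) :
    (input_dict.foldl groupStepB PySem.Dict.empty).getD t [] =
      input_dict.filter
        (fun b => PySem.Str.upper (PySem.Str.strip (fieldB b "TITLE")) == t) := by
  have h := getD_foldl_modify_append_key
      (fun book => PySem.Str.upper (PySem.Str.strip (fieldB book "TITLE"))) t
      input_dict PySem.Dict.empty
  have hfun : groupStepB = fun d book =>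
      d.modify (PySem.Str.upper (PySem.Str.strip (fieldB book "TITLE"))) [] (· ++ [book]) := rfl
  rw [hfun]
  simpa using h

lemma preHas_isSome (b : List (String × String)) (k : String) (h : preHas b k = true) :
    (getOptB b k).isSome = true := by
  rcases List.any_eq_true.mp h with ⟨p, hp, hpk⟩
  rw [getOptB, Option.isSome_map, List.find?_isSome]
  exact ⟨p, hp, hpk⟩

-- ===== VERDICT (by name: the statement is the Claim_ definition above) =====
theorem match_titles_and_merge_spec : Claim_equal_match_titles_and_merge := by
  intro input_dict _ hpre
  unfold Spec_match_titles_and_merge match_titles_and_merge match_titles_and_merge_alt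
  have h1 : input_dict.foldl stepA PySem.Dict.empty =
      mapD (input_dict.foldl groupStepB PySem.Dict.empty) := by
    rw [← mapD_empty]
    exact main_inv input_dict PySem.Dict.empty (by simp)
  rw [h1]
  set groups := input_dict.foldl groupStepB PySem.Dict.empty with hg
  have hnd : groups.keys.Nodup := by
    rw [hg]
    exact PySem.Dict.nodup_keys_foldl_modify_key input_dict
      (fun book => PySem.Str.upper (PySem.Str.strip (fieldB book "TITLE"))) []
      (fun _ book => (· ++ [book])) PySem.Dict.empty (by simp)
  have h2 : (groups.items.foldl (fun r p => r.insert p.1 (dedupGroupB p.2)) PySem.Dict.empty).items =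
      PySem.Dict.empty.items ++ groups.items.map (fun p => (p.1, dedupGroupB p.2)) :=
    PySem.Dict.items_foldl_insert_fresh groups.items (fun p => p.1) (fun p => dedupGroupB p.2)
      PySem.Dict.empty (fun a _ => by simp [PySem.Dict.contains_empty])
      (by simpa [PySem.Dict.keys] using hnd)
  rw [h2]
  simp only [mapD]
  have h3 : groups.items.map (fun p => (p.1, dedupGroupB p.2)) =
      groups.items.map (fun p => (p.1, keptSeq p.2)) := by
    apply List.map_congr_left
    intro p hp
    have hmem : (p.1, p.2) ∈ groups.items := by simpa using hp
    have hval : groups.getD p.1 [] = p.2 := PySem.Dict.getD_of_mem_items groups hmem hnd []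
    rw [hg, groups_getD] at hval
    by_cases hlen : p.2.length ≤ 1
    · rw [dedupGroupB_small p.2 hlen]
    · have htitle : ∀ b ∈ p.2, preTitle b = p.1 := by
        intro b hb
        rw [← hval] at hb
        simpa [preTitle, preField] using (List.mem_filter.mp hb).2
      have hpw : p.2.Pairwise (fun b1 b2 => preTitle b1 = preTitle b2 →
          preHas b1 "DB" = true ∧ preHas b2 "DB" = true ∧
          (preField b1 "DB" = preField b2 "DB" →
            ∀ k ∈ ["ISSN", "e-ISSN", "ISBN", "e-ISBN"],
              preHas b1 k = true ∧ preHas b2 k = true)) := by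
        rw [← hval]
        exact List.Pairwise.sublist List.filter_sublist hpre.2
      have hdb : ∀ b ∈ p.2, (getOptB b "DB").isSome = true := by
        rcases hlist : p.2 with _ | ⟨x, t⟩
        · simp
        rcases t with _ | ⟨y, rest⟩
        · rw [hlist] at hlen; simp at hlen
        rw [hlist] at hpw htitle
        rcases List.pairwise_cons.mp hpw with ⟨hx, _⟩
        have hteq : ∀ b ∈ y :: rest, preTitle x = preTitle b := by
          intro b hb
          rw [htitle x List.mem_cons_self, htitle b (List.mem_cons_of_mem x hb)]
        intro b hb
        rcases List.mem_cons.mp hb with hbx | hbt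
        · exact hbx ▸ preHas_isSome x "DB" (hx y List.mem_cons_self
            (hteq y List.mem_cons_self)).1
        · exact preHas_isSome b "DB" (hx b hbt (hteq b hbt)).2.1
      rw [dedupGroupB_eq p.2 hdb]
  rw [h3]
  rfl
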